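-- pv_equiv track=rewrite | github.com/CodonTeam/codon-model | test.py | _segment_by_mask
-- ===== SOURCE A (Python) =====
-- def _segment_by_mask(ids: list[int], mask: list[bool]) -> list[tuple[bool, list[int]]]:
--     """把 (ids, mask) 切成连续 mask 相同的段。"""
--     if not ids:
--         return []
--     segs: list[tuple[bool, list[int]]] = []
--     cur_m = mask[0]
--     cur_ids = [ids[0]]
--     for tid, ig in zip(ids[1:], mask[1:]):
--         if ig == cur_m:
--             cur_ids.append(tid)
--         else:
--             segs.append((cur_m, cur_ids))
--             cur_m, cur_ids = ig, [tid]
--     segs.append((cur_m, cur_ids))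
--     return segs
-- ===== SOURCE B (Python) =====
-- def _segment_by_mask(ids: list[int], mask: list[bool]) -> list[tuple[bool, list[int]]]:
--     """Two-pointer scan over the zipped (mask, id) pairs: find each run's end index, slice it out."""
--     pairs = list(zip(mask, ids))
--     n = len(pairs)
--     out: list[tuple[bool, list[int]]] = []
--     i = 0
--     while i < n:
--         m = pairs[i][0]
--         j = i + 1
--         while j < n and pairs[j][0] == m:
--             j += 1
--         out.append((m, [t for _, t in pairs[i:j]]))
--         i = j
--     return out
-- ===== Notes on version B (the rewrite author's own statement) =====
-- stated objective: alternative
-- what changed: Replaces A's running-accumulator loop (current mask + current ids, flushed on change) by a two-pointer scan over the zipped (mask,id) pairs that finds each run's end index and slices the run out.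
import Mathlib
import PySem

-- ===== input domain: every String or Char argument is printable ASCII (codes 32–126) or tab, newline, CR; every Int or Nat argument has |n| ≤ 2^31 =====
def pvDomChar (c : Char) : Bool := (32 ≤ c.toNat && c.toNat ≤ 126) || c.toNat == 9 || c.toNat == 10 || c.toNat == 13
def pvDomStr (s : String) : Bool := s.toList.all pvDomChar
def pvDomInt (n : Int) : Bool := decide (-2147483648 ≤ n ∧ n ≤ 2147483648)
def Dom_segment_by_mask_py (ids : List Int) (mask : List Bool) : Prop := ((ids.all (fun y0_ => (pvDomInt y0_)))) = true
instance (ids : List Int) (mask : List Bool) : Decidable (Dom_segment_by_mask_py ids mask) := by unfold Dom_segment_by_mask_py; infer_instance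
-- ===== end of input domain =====

-- B replaces A's running-accumulator loop by a two-pointer run scan over the zipped pairs (alternative decomposition, same cost); equivalence is about the return value only.

-- ===== PORT A =====
-- the for-loop over zip(ids[1:], mask[1:]) with state (segs, cur_m, cur_ids)
def loopA : List (Int × Bool) → List (Bool × List Int) → Bool → List Int → List (Bool × List Int)
  | [], segs, curM, curIds => segs ++ [(curM, curIds)]
  | (tid, ig) :: rest, segs, curM, curIds =>
    if ig == curM then loopA rest segs curM (curIds ++ [tid])
    else loopA rest (segs ++ [(curM, curIds)]) ig [tid]

def segment_by_mask_py (ids : List Int) (mask : List Bool) : List (Bool × List Int) :=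
  match ids, mask with
  | [], _ => []
  | _ :: _, [] => []       -- Python raises IndexError at mask[0]; excluded by Pre_
  | i0 :: it, m0 :: mt => loopA (List.zip it mt) [] m0 [i0]

-- ===== PORT B =====
-- inner while: advance j while pairs[j][0] == m
def findRun (pairs : List (Bool × Int)) (m : Bool) (n : Nat) (j : Nat) : Nat :=
  if _ : j < n then
    if (pairs.getD j (false, 0)).1 == m then findRun pairs m n (j + 1) else j
  else j
termination_by n - j

theorem findRun_ge (pairs : List (Bool × Int)) (m : Bool) (n : Nat) (j : Nat) :
    j ≤ findRun pairs m n j := by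
  unfold findRun
  split
  · split
    · exact le_trans (Nat.le_succ j) (findRun_ge pairs m n (j + 1))
    · exact le_refl j
  · exact le_refl j
termination_by n - j

-- outer while: i < n, slice pairs[i:j] out as one run
def buildRuns (pairs : List (Bool × Int)) (n : Nat) (i : Nat) (out : List (Bool × List Int)) :
    List (Bool × List Int) :=
  if h : i < n then
    -- m := pairs[i][0]; j := the inner while; pairs[i:j] (0 ≤ i < j ≤ n) ported exactly as (drop i).take (j - i)
    buildRuns pairs n (findRun pairs (pairs.getD i (false, 0)).1 n (i + 1))
      (out ++ [((pairs.getD i (false, 0)).1,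
        ((pairs.drop i).take (findRun pairs (pairs.getD i (false, 0)).1 n (i + 1) - i)).map Prod.snd)])
  else out
termination_by n - i
decreasing_by
  have := findRun_ge pairs (pairs.getD i (false, 0)).1 n (i + 1)
  omega

def segment_by_mask_py_alt (ids : List Int) (mask : List Bool) : List (Bool × List Int) :=
  let pairs := List.zip mask ids
  buildRuns pairs pairs.length 0 []

-- ===== PRECONDITION & SPEC =====
-- Pre_ excludes only the inputs where A raises IndexError (nonempty ids, empty mask)
def Pre_segment_by_mask_py (ids : List Int) (mask : List Bool) : Prop := ids ≠ [] → mask ≠ []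
instance (ids : List Int) (mask : List Bool) : Decidable (Pre_segment_by_mask_py ids mask) := by unfold Pre_segment_by_mask_py; infer_instance

def pvWitness_segment_by_mask_py : List Int × List Bool := ([1, 2, 3], [true, true, false])

def Spec_segment_by_mask_py (ids : List Int) (mask : List Bool) (out : List (Bool × List Int)) : Prop := out = segment_by_mask_py_alt ids mask
instance (ids : List Int) (mask : List Bool) (out : List (Bool × List Int)) : Decidable (Spec_segment_by_mask_py ids mask out) := by unfold Spec_segment_by_mask_py; infer_instance

-- ===== CLAIM (what is proved, stated in full; the proofs are below) =====
def Claim_equal_segment_by_mask_py : Prop := ∀ (ids : List Int) (mask : List Bool), Dom_segment_by_mask_py ids mask → Pre_segment_by_mask_py ids mask → Spec_segment_by_mask_py ids mask (segment_by_mask_py ids mask)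

-- ===== LEMMAS AND PROOFS =====

-- reference shape both ports reduce to: runs of equal first component
def runsSpec : List (Bool × Int) → List (Bool × List Int)
  | [] => []
  | (m, t) :: rest =>
    (m, t :: (rest.takeWhile (fun p => p.1 == m)).map Prod.snd)
      :: runsSpec (rest.dropWhile (fun p => p.1 == m))
termination_by l => l.length
decreasing_by
  simpa using Nat.lt_succ_of_le (List.length_dropWhile_le _ _)

theorem takeWhile_swap (l : List (Int × Bool)) (m : Bool) :
    (l.map Prod.swap).takeWhile (fun p => p.1 == m)
      = (l.takeWhile (fun p => p.2 == m)).map Prod.swap := by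
  induction l with
  | nil => rfl
  | cons x xs ih =>
    obtain ⟨t, g⟩ := x
    by_cases h : g = m
    · simp [List.takeWhile, Prod.swap, h, ih]
    · have hb : (g == m) = false := by simp [h]
      simp [List.takeWhile, Prod.swap, hb]

theorem dropWhile_swap (l : List (Int × Bool)) (m : Bool) :
    (l.map Prod.swap).dropWhile (fun p => p.1 == m)
      = (l.dropWhile (fun p => p.2 == m)).map Prod.swap := by
  induction l with
  | nil => rfl
  | cons x xs ih =>
    obtain ⟨t, g⟩ := x
    by_cases h : g = m
    · simp [List.dropWhile, Prod.swap, h, ih]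
    · have hb : (g == m) = false := by simp [h]
      simp [List.dropWhile, Prod.swap, hb]

theorem map_snd_swap (l : List (Int × Bool)) :
    (l.map Prod.swap).map Prod.snd = l.map Prod.fst := by
  simp [List.map_map, Function.comp_def, Prod.swap]

theorem loopA_eq (zs : List (Int × Bool)) : ∀ (segs : List (Bool × List Int)) (m : Bool) (cur : List Int),
    loopA zs segs m cur
      = segs ++ (m, cur ++ (zs.takeWhile (fun p => p.2 == m)).map Prod.fst)
          :: runsSpec ((zs.dropWhile (fun p => p.2 == m)).map Prod.swap) := by
  induction zs with
  | nil => intro segs m cur; simp [loopA, runsSpec]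
  | cons x rest ih =>
    intro segs m cur
    obtain ⟨t, g⟩ := x
    by_cases h : g = m
    · simp [loopA, h, List.takeWhile, List.dropWhile, ih]
    · have hb : (g == m) = false := by simp [h]
      simp only [loopA, hb, Bool.false_eq_true, if_false, ih, List.takeWhile, List.dropWhile,
        List.map_cons]
      rw [runsSpec]
      simp [takeWhile_swap, dropWhile_swap, List.map_map, Function.comp_def, Prod.swap]

theorem take_takeWhile_length (p : Bool × Int → Bool) (l : List (Bool × Int)) :
    l.take (l.takeWhile p).length = l.takeWhile p := by
  induction l with
  | nil => rfl
  | cons x xs ih =>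
    by_cases h : p x = true <;> simp [List.takeWhile, h, ih]

theorem drop_takeWhile_length (p : Bool × Int → Bool) (l : List (Bool × Int)) :
    l.drop (l.takeWhile p).length = l.dropWhile p := by
  induction l with
  | nil => rfl
  | cons x xs ih =>
    by_cases h : p x = true <;> simp [List.takeWhile, List.dropWhile, h, ih]

theorem findRun_eq (pairs : List (Bool × Int)) (m : Bool) (j : Nat) :
    findRun pairs m pairs.length j
      = j + ((pairs.drop j).takeWhile (fun p => p.1 == m)).length := by
  unfold findRun
  split
  · rename_i hj
    have hdrop : pairs.drop j = pairs[j] :: pairs.drop (j + 1) :=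
      List.drop_eq_getElem_cons hj
    have hget : pairs.getD j (false, 0) = pairs[j] := List.getD_eq_getElem _ _ hj
    split
    · rename_i hm
      rw [findRun_eq pairs m (j + 1), hdrop, List.takeWhile_cons]
      rw [hget] at hm
      simp [hm]
      omega
    · rename_i hm
      rw [hget] at hm
      simp only [Bool.not_eq_true] at hm
      rw [hdrop, List.takeWhile_cons]
      simp [hm]
  · rename_i hj
    have : pairs.drop j = [] := List.drop_eq_nil_of_le (by omega)
    simp [this]
termination_by pairs.length - j

theorem buildRuns_eq (pairs : List (Bool × Int)) (i : Nat) (out : List (Bool × List Int)) :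
    buildRuns pairs pairs.length i out = out ++ runsSpec (pairs.drop i) := by
  rw [buildRuns]
  split
  · rename_i hi
    have hget : pairs.getD i (false, 0) = pairs[i] := List.getD_eq_getElem _ _ hi
    have hdrop : pairs.drop i = pairs[i] :: pairs.drop (i + 1) :=
      List.drop_eq_getElem_cons hi
    set m := (pairs.getD i (false, 0)).1 with hm
    have hfr := findRun_eq pairs m (i + 1)
    set L := ((pairs.drop (i + 1)).takeWhile (fun p => p.1 == m)).length with hL
    have hj : findRun pairs m pairs.length (i + 1) = i + 1 + L := hfr
    rw [hj]
    have hrec := buildRuns_eq pairs (i + 1 + L) (out ++ [(m, ((pairs.drop i).take (i + 1 + L - i)).map Prod.snd)])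
    rw [hrec]
    have hslice : (pairs.drop i).take (i + 1 + L - i)
        = pairs[i] :: (pairs.drop (i + 1)).takeWhile (fun p => p.1 == m) := by
      have : i + 1 + L - i = L + 1 := by omega
      rw [this, hdrop, List.take_succ_cons, take_takeWhile_length]
    have hdropj : pairs.drop (i + 1 + L)
        = (pairs.drop (i + 1)).dropWhile (fun p => p.1 == m) := by
      have h1 := drop_takeWhile_length (fun p => p.1 == m) (pairs.drop (i + 1))
      rw [List.drop_drop] at h1
      rw [← hL] at h1
      exact h1
    rw [hslice, hdropj, hdrop]
    rw [runsSpec]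
    have hmm : m = pairs[i].1 := by rw [hm, hget]
    simp [hmm]
  · rename_i hi
    have : pairs.drop i = [] := List.drop_eq_nil_of_le (by omega)
    simp [this, runsSpec]
termination_by pairs.length - i
decreasing_by
  have := findRun_ge pairs m pairs.length (i + 1)
  omega

theorem alt_eq_runsSpec (ids : List Int) (mask : List Bool) :
    segment_by_mask_py_alt ids mask = runsSpec (List.zip mask ids) := by
  unfold segment_by_mask_py_alt
  simpa using buildRuns_eq (List.zip mask ids) 0 []

-- ===== VERDICT (by name: the statement is the Claim_ definition above) =====
theorem segment_by_mask_py_spec : Claim_equal_segment_by_mask_py := by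
  intro ids mask _ hpre
  unfold Spec_segment_by_mask_py
  rw [alt_eq_runsSpec]
  match ids, mask with
  | [], _ => simp [segment_by_mask_py, runsSpec]
  | i0 :: it, [] => exact absurd rfl (hpre (by simp))
  | i0 :: it, m0 :: mt =>
    show loopA (List.zip it mt) [] m0 [i0] = runsSpec ((m0, i0) :: List.zip mt it)
    rw [loopA_eq, runsSpec]
    have hz : List.zip mt it = (List.zip it mt).map Prod.swap := by
      rw [List.zip_swap]
    rw [hz, takeWhile_swap, dropWhile_swap, map_snd_swap]
    simp
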